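-- pv_equiv track=rewrite | github.com/piplupmaster32/quanfluence | encodings/qubo_helpers.py | encode_vector
-- ===== SOURCE A (Python) =====
-- import math
--
-- def create_binary_encoder(kappa):
--     """Create binary encoding parameters for given upper bound"""
--     width = math.floor(math.log2(kappa)) + 1
--     coefficients = [2**i for i in range(width)]
--     return width, coefficients
--
-- def encode_integer(value, width, coefficients):
--     """Encode single integer to binary using coefficients"""
--     binary = []
--     remaining = value
--     for coeff in reversed(coefficients):
--         if remaining >= coeff:
--             binary.append(1)
--             remaining -= coeff
--         else:
--             binary.append(0)
--     binary.reverse()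
--     return binary
--
-- def encode_vector(integer_vector, kappa):
--     """Encode full integer vector to binary"""
--     width, coefficients = create_binary_encoder(kappa)
--
--     binary_vector = []
--     for val in integer_vector:
--         if val < 0 or val > kappa:
--             raise ValueError(f"Value {val} outside bounds [0, {kappa}]")
--         binary_repr = encode_integer(val, width, coefficients)
--         binary_vector.extend(binary_repr)
--
--     return binary_vector, width, coefficients
-- ===== SOURCE B (Python) =====
-- def encode_vector(integer_vector, kappa):
--     """Encode full integer vector to binary"""
--     width = kappa.bit_length()
--     bits = []
--     for val in integer_vector:
--         if val < 0 or val > kappa: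
--             raise ValueError(f"Value {val} outside bounds [0, {kappa}]")
--         q = val
--         for _ in range(width):
--             q, r = divmod(q, 2)
--             bits.append(r)
--     return bits, width, [2 ** i for i in range(width)]
-- ===== Notes on version B (the rewrite author's own statement) =====
-- stated objective: alternative
-- what changed: Per-integer encoding now does repeated divmod by 2 (width fixed-count steps, LSB-first, no final reverse) instead of greedy subtraction over a reversed power-of-two coefficient table, and the width comes from kappa.bit_length() instead of math.log2; the coefficient list is only built once for the return value.
import Mathlib
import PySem

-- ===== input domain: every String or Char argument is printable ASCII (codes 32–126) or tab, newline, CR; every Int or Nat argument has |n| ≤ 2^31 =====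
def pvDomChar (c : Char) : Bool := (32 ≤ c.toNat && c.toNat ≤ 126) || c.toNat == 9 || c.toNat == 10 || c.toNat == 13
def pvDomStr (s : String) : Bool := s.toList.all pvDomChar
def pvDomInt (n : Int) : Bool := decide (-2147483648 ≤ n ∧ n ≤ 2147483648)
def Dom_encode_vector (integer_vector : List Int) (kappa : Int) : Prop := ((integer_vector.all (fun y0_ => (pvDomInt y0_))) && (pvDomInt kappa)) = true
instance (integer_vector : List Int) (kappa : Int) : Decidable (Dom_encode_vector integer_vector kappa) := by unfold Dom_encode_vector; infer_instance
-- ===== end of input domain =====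

-- B replaces A's greedy subtraction over a reversed coefficient table by repeated divmod-by-2
-- (LSB-first, no table lookup, no reversal): objective 'alternative'.

-- ===== PORT A =====
-- width = math.floor(math.log2(kappa)) + 1; exact as Nat.log2 for 1 ≤ kappa ≤ 2^31 (the domain)
def create_binary_encoder (kappa : Int) : Int × List Int :=
  let width : Int := (Nat.log2 kappa.toNat : Int) + 1
  let coefficients : List Int := (PySem.List.pyRange 0 width 1).map (fun i => (2:Int) ^ i.toNat)
  (width, coefficients)

def encode_integer (value : Int) (width : Int) (coefficients : List Int) : List Int :=
  let st := coefficients.reverse.foldl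
    (fun (st : List Int × Int) coeff =>
      if st.2 ≥ coeff then (st.1 ++ [1], st.2 - coeff) else (st.1 ++ [0], st.2))
    ([], value)
  st.1.reverse

def encode_vector (integer_vector : List Int) (kappa : Int) : List Int × Int × List Int :=
  let wc := create_binary_encoder kappa
  let binary_vector := integer_vector.foldl
    (fun acc val => acc ++ encode_integer val wc.1 wc.2) []
  (binary_vector, wc.1, wc.2)

-- ===== PORT B =====
def encode_vector_alt (integer_vector : List Int) (kappa : Int) : List Int × Int × List Int :=
  let width : Nat := PySem.Int.bitLength kappa
  let bits := integer_vector.foldl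
    (fun acc val =>
      ((List.range width).foldl
        (fun (st : List Int × Int) _ =>
          (st.1 ++ [PySem.Int.mod st.2 2], PySem.Int.floordiv st.2 2))
        (acc, val)).1)
    []
  (bits, (width : Int), (List.range width).map (fun i => (2:Int) ^ i))

-- ===== PRECONDITION & SPEC =====
-- Pre_ excludes exactly the inputs where A raises ValueError: kappa ≤ 0 (math.log2 domain error)
-- and any element outside [0, kappa].
def Pre_encode_vector (integer_vector : List Int) (kappa : Int) : Prop :=
  1 ≤ kappa ∧ ∀ v ∈ integer_vector, 0 ≤ v ∧ v ≤ kappa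
instance (integer_vector : List Int) (kappa : Int) : Decidable (Pre_encode_vector integer_vector kappa) := by unfold Pre_encode_vector; infer_instance
def pvWitness_encode_vector : List Int × Int := ([0, 1, 2, 5], 5)

def Spec_encode_vector (integer_vector : List Int) (kappa : Int) (out : List Int × Int × List Int) : Prop := out = encode_vector_alt integer_vector kappa
instance (integer_vector : List Int) (kappa : Int) (out : List Int × Int × List Int) : Decidable (Spec_encode_vector integer_vector kappa out) := by unfold Spec_encode_vector; infer_instance

-- ===== CLAIM (what is proved, stated in full; the proofs are below) =====
def Claim_equal_encode_vector : Prop := ∀ (integer_vector : List Int) (kappa : Int), Dom_encode_vector integer_vector kappa → Pre_encode_vector integer_vector kappa → Spec_encode_vector integer_vector kappa (encode_vector integer_vector kappa)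

-- ===== LEMMAS AND PROOFS =====

-- bit_length agrees with floor(log2)+1 on positive numbers
theorem bitLength_eq_log2 : ∀ n : Nat, 1 ≤ n → PySem.Int.bitLength (n : Int) = Nat.log2 n + 1 := by
  intro n
  induction n using Nat.strong_induction_on with
  | _ n ih =>
    intro h1
    rw [PySem.Int.bitLength_natCast (by omega : 0 < n)]
    rw [Nat.log2_eq_log_two]
    by_cases h2 : 2 ≤ n
    · rw [ih (n / 2) (by omega) (by omega), Nat.log2_eq_log_two]
      have hd := Nat.log_div_base 2 n
      have hp := Nat.log_pos (by omega : 1 < 2) h2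
      omega
    · have : n = 1 := by omega
      subst this
      simp [PySem.Int.bitLength_zero]

-- MSB-first bits produced by A's greedy subtraction
def natMsb : Nat → Nat → List Int
  | 0, _ => []
  | w + 1, n => (if 2 ^ w ≤ n then (1:Int) else 0) :: natMsb w (n % 2 ^ w)

-- LSB-first bits produced by B's divmod loop
def natBits : Nat → Nat → List Int
  | 0, _ => []
  | w + 1, n => natBits w n ++ [((n / 2 ^ w % 2 : Nat) : Int)]

theorem mod2_cast (m : Nat) : PySem.Int.mod (m : Int) 2 = ((m % 2 : Nat) : Int) := by
  exact_mod_cast PySem.Int.mod_natCast m 2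
theorem div2_cast (m : Nat) : PySem.Int.floordiv (m : Int) 2 = ((m / 2 : Nat) : Int) := by
  exact_mod_cast PySem.Int.floordiv_natCast m 2

theorem greedy_fold (w : Nat) : ∀ (n : Nat), n < 2 ^ w → ∀ (bAcc : List Int),
    (((List.range w).map (fun i => (2:Int) ^ i)).reverse.foldl
      (fun (st : List Int × Int) coeff =>
        if st.2 ≥ coeff then (st.1 ++ [1], st.2 - coeff) else (st.1 ++ [0], st.2))
      (bAcc, (n : Int))) = (bAcc ++ natMsb w n, ((n % 2 ^ 0 : Nat) : Int)) := by
  induction w with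
  | zero =>
    intro n hn bAcc
    interval_cases n
    simp [natMsb]
  | succ w ih =>
    intro n hn bAcc
    rw [List.range_succ, List.map_append, List.reverse_append]
    simp only [List.map_cons, List.map_nil, List.reverse_cons, List.reverse_nil,
      List.nil_append, List.singleton_append, List.foldl_cons]
    have hcast : ((n : Int) ≥ (2:Int) ^ w) ↔ 2 ^ w ≤ n := by
      constructor <;> intro h <;> [exact_mod_cast h; exact_mod_cast h]
    by_cases hb : 2 ^ w ≤ n
    · rw [if_pos (hcast.mpr hb)]
      have hrem : (n : Int) - (2:Int) ^ w = ((n % 2 ^ w : Nat) : Int) := by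
        have h1 : n % 2 ^ w = n - 2 ^ w := by
          rw [Nat.mod_eq_sub_mod hb, Nat.mod_eq_of_lt (by omega)]
        rw [h1]
        push_cast [hb]
        ring
      rw [hrem, ih (n % 2 ^ w) (Nat.mod_lt _ (by positivity)) (bAcc ++ [1])]
      simp [natMsb, hb]
    · rw [if_neg (fun h => hb (hcast.mp h))]
      have hlt : n < 2 ^ w := by omega
      have h1 : n % 2 ^ w = n := Nat.mod_eq_of_lt hlt
      rw [show ((n:Nat):Int) = ((n % 2 ^ w : Nat) : Int) by rw [h1]]
      rw [ih (n % 2 ^ w) (by omega) (bAcc ++ [0])]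
      simp [natMsb, hb, h1]

theorem divmod_fold (w : Nat) : ∀ (n : Nat) (acc : List Int),
    ((List.range w).foldl
      (fun (st : List Int × Int) _ =>
        (st.1 ++ [PySem.Int.mod st.2 2], PySem.Int.floordiv st.2 2))
      (acc, (n : Int))) = (acc ++ natBits w n, ((n / 2 ^ w : Nat) : Int)) := by
  induction w with
  | zero => intro n acc; simp [natBits]
  | succ w ih =>
    intro n acc
    rw [List.range_succ, List.foldl_append, ih n acc]
    simp only [List.foldl_cons, List.foldl_nil, natBits, mod2_cast, div2_cast,
      Nat.div_div_eq_div_mul, ← pow_succ, List.append_assoc]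

theorem natBits_mod : ∀ (w k n : Nat), w ≤ k → natBits w (n % 2 ^ k) = natBits w n := by
  intro w
  induction w with
  | zero => intro k n _; simp [natBits]
  | succ w ih =>
    intro k n hk
    simp only [natBits, ih k n (by omega)]
    congr 2
    have h1 : 2 ^ k = 2 ^ w * 2 ^ (k - w) := by rw [← pow_add]; congr 1; omega
    rw [h1, Nat.mod_mul_right_div_self]
    have h2 : (2:Nat) ∣ 2 ^ (k - w) := dvd_pow_self 2 (by omega)
    rw [Nat.mod_mod_of_dvd _ h2]

theorem msb_reverse : ∀ (w n : Nat), n < 2 ^ w → (natMsb w n).reverse = natBits w n := by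
  intro w
  induction w with
  | zero => intro n _; simp [natMsb, natBits]
  | succ w ih =>
    intro n hn
    have hmlt : n % 2 ^ w < 2 ^ w := Nat.mod_lt _ (by positivity)
    simp only [natMsb, List.reverse_cons, ih (n % 2 ^ w) hmlt,
      natBits_mod w w n (le_refl w), natBits]
    congr 2
    by_cases hb : 2 ^ w ≤ n
    · have : n / 2 ^ w = 1 := by
        have hn2 : n < 2 ^ w * 2 := by rw [← pow_succ]; exact hn
        exact Nat.div_eq_of_lt_le (by omega) (by omega)
      simp [hb, this]
    · have : n / 2 ^ w = 0 := Nat.div_eq_of_lt (by omega)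
      simp [hb, this]

-- A's per-value greedy encoding equals B's LSB bit list
theorem encode_integer_eq (w : Nat) (W : Int) (v : Int) (hv : 0 ≤ v) (hlt : v.toNat < 2 ^ w) :
    encode_integer v W ((List.range w).map (fun i => (2:Int) ^ i)) = natBits w v.toNat := by
  unfold encode_integer
  rw [show v = ((v.toNat : Nat) : Int) from (Int.toNat_of_nonneg hv).symm]
  simp only [Int.toNat_natCast]
  rw [greedy_fold w v.toNat hlt []]
  simp [msb_reverse w v.toNat hlt]

-- B's inner loop from (acc, v) appends exactly those bits
theorem inner_eq (w : Nat) (v : Int) (hv : 0 ≤ v) (acc : List Int) :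
    ((List.range w).foldl
      (fun (st : List Int × Int) _ =>
        (st.1 ++ [PySem.Int.mod st.2 2], PySem.Int.floordiv st.2 2))
      (acc, v)).1 = acc ++ natBits w v.toNat := by
  rw [show v = ((v.toNat : Nat) : Int) from (Int.toNat_of_nonneg hv).symm]
  simp only [Int.toNat_natCast]
  rw [divmod_fold w v.toNat acc]

theorem fold_eq (kappa : Int) (w : Nat) (W : Int) (hbw : kappa.toNat < 2 ^ w) :
    ∀ (l : List Int) (acc : List Int), (∀ v ∈ l, 0 ≤ v ∧ v ≤ kappa) →
    l.foldl (fun acc val => acc ++ encode_integer val W ((List.range w).map (fun i => (2:Int) ^ i))) acc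
    = l.foldl (fun acc val =>
        ((List.range w).foldl
          (fun (st : List Int × Int) _ =>
            (st.1 ++ [PySem.Int.mod st.2 2], PySem.Int.floordiv st.2 2))
          (acc, val)).1) acc := by
  intro l
  induction l with
  | nil => intro acc _; rfl
  | cons v t ih =>
    intro acc hmem
    obtain ⟨hv0, hvk⟩ := hmem v (List.mem_cons_self)
    have hlt : v.toNat < 2 ^ w := lt_of_le_of_lt (Int.toNat_le_toNat hvk) hbw
    simp only [List.foldl_cons]
    rw [encode_integer_eq w W v hv0 hlt, inner_eq w v hv0 acc]
    exact ih _ (fun x hx => hmem x (List.mem_cons_of_mem _ hx))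

-- the coefficient table is the same list
theorem coeff_eq (w : Nat) :
    (PySem.List.pyRange 0 (w : Int) 1).map (fun i => (2:Int) ^ i.toNat)
    = (List.range w).map (fun i => (2:Int) ^ i) := by
  rw [PySem.List.pyRange_one]
  simp [List.map_map, Function.comp_def]

-- ===== VERDICT (by name: the statement is the Claim_ definition above) =====
theorem encode_vector_spec : Claim_equal_encode_vector := by
  intro iv kappa hdom hpre
  obtain ⟨hk, hvals⟩ := hpre
  have hK : kappa = ((kappa.toNat : Nat) : Int) := (Int.toNat_of_nonneg (by omega)).symm
  have hbl : PySem.Int.bitLength kappa = Nat.log2 kappa.toNat + 1 := by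
    conv_lhs => rw [hK]
    rw [bitLength_eq_log2 kappa.toNat (by omega)]
  have hwcast : ((Nat.log2 kappa.toNat : Nat) : Int) + 1 = ((Nat.log2 kappa.toNat + 1 : Nat) : Int) := by
    push_cast; ring
  have hbw : kappa.toNat < 2 ^ (Nat.log2 kappa.toNat + 1) := by
    have h := PySem.Int.lt_two_pow_bitLength kappa
    rw [hbl] at h
    omega
  unfold Spec_encode_vector encode_vector encode_vector_alt create_binary_encoder
  simp only [hbl, hwcast, coeff_eq]
  refine congrArg₂ _ ?_ rfl
  exact fold_eq kappa (Nat.log2 kappa.toNat + 1) _ hbw iv [] hvals
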